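-- pv_equiv track=rewrite | github.com/ThuyBachDuong/hello-world | FunThingsToDo/test.py | somefunctLoop
-- ===== SOURCE A (Python) =====
-- def increasingOrder(n):
--     lst = [i for i in str(n)]
--     lst.sort()
--     return lst
--
-- def decreasingOrder(n):
--     lst = increasingOrder(n)
--     lst.reverse()
--     return lst
--
-- def somefunct(n):
--     incre = int(''.join(increasingOrder(n)))
--     decre = int(''.join(decreasingOrder(n)))
--     return decre - incre
--
-- def stopping1(n):
--     a = n
--     lst = []
--     while a not in lst:
--         lst.append(a)
--         a = somefunct(a)
--     lst.append(a)
--     return lst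
--
-- def somefunctLoop(n):
--     lst = stopping1(n)
--     l = len(lst)
--     for i in range(l):
--         if lst[i] == lst[-1]:
--             newlist = lst[i:-1]
--             break
--     return(newlist)
-- ===== SOURCE B (Python) =====
-- def somefunct(n):
--     s = ''.join(sorted(str(n)))
--     return int(s[::-1]) - int(s)
--
-- def somefunctLoop(n):
--     def walk(a, seen):
--         if a in seen:
--             return a, [], False
--         r, cyc, done = walk(somefunct(a), seen | {a})
--         if done:
--             return r, cyc, True
--         return r, [a] + cyc, a == r
--     return walk(n, frozenset())[1]
-- ===== Notes on version B (the rewrite author's own statement) =====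
-- stated objective: alternative
-- what changed: Replaces A's store-everything list with its membership loop, second rescanning pass and slice by a single recursive descent that keeps only a set of seen values, detects the repeated value at the bottom of the recursion, and emits the cycle while unwinding under a done flag (no indices, no slicing, no second pass).
import Mathlib
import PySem

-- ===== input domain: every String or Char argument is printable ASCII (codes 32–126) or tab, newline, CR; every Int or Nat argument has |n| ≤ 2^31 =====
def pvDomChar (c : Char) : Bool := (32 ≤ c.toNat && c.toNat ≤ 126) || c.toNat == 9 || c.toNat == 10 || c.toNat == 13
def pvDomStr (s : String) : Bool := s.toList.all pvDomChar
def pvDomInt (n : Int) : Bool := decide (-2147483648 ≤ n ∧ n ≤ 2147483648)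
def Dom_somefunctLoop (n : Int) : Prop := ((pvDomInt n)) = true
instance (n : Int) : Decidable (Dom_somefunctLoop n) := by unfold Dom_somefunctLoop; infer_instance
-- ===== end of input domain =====

-- B replaces A's store-everything list with its membership loop, second rescanning pass and
-- slice by a single recursive descent over a set of seen values that detects the repeat at the
-- bottom and emits the cycle while unwinding (alternative decomposition, similar cost).

-- fuel bound for the recursions (a totality guard only; the equivalence holds for every fuel)
def pvFuel : Nat := 1099511627776

-- ===== PORT A =====
def increasingOrderA (n : Int) : List Char :=
  PySem.List.sorted (PySem.Int.toChars n) (fun c => c) false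

def decreasingOrderA (n : Int) : List Char :=
  (increasingOrderA n).reverse

-- int(...) raises ValueError for negative n (the reversed digit string ends with the minus
-- sign); such inputs are outside Pre_, so the total Option.getD form is only a guard.
def somefunctA (n : Int) : Int :=
  let incre := (PySem.Int.ofChars? (increasingOrderA n)).getD 0
  let decre := (PySem.Int.ofChars? (decreasingOrderA n)).getD 0
  decre - incre

def stopping1A : Nat → Int → List Int → List Int
  | 0, a, lst => lst ++ [a]                    -- fuel exhausted: behave as the loop condition failing
  | fuel+1, a, lst =>
    if a ∈ lst then lst ++ [a]
    else stopping1A fuel (somefunctA a) (lst ++ [a])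

-- the for-range scan with break; the final [] is Python's NameError fall-through (unreachable:
-- lst[-1] always occurs in lst)
def findCycleA (lst : List Int) (i : Nat) : List Int :=
  if i < lst.length then
    if PySem.List.pyGetD lst (i : Int) 0 = PySem.List.pyGetD lst (-1) 0 then
      PySem.List.slice lst (some (i : Int)) (some (-1))
    else findCycleA lst (i+1)
  else []
termination_by lst.length - i

def somefunctLoop (n : Int) : List Int :=
  findCycleA (stopping1A pvFuel n []) 0

-- ===== PORT B =====
def somefunctB (n : Int) : Int :=
  let s := PySem.List.sorted (PySem.Int.toChars n) (fun c => c) false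
  ((PySem.Int.ofChars? ((PySem.List.slice? s none none (-1)).getD [])).getD 0)
    - ((PySem.Int.ofChars? s).getD 0)

-- walk(a, seen): returns (repeated value, cycle collected while unwinding, done flag).
-- fuel-0 fallback: behave as if the 'a in seen' test just decided the recursion's fate.
def walkB : Nat → Int → PySem.Set Int → Int × List Int × Bool
  | 0, a, seen => if PySem.Set.contains seen a then (a, [], false) else (a, [], true)
  | fuel+1, a, seen =>
    if PySem.Set.contains seen a then (a, [], false)
    else
      match walkB fuel (somefunctB a) (PySem.Set.union seen [a]) with
      | (r, cyc, done) => if done then (r, cyc, true) else (r, a :: cyc, decide (a = r))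

def somefunctLoop_alt (n : Int) : List Int :=
  (walkB pvFuel n PySem.Set.empty).2.1

-- ===== PRECONDITION & SPEC =====
-- Pre_ excludes negative n: there Python A raises ValueError (int() of the reversed digit string).
def Pre_somefunctLoop (n : Int) : Prop := 0 ≤ n
instance (n : Int) : Decidable (Pre_somefunctLoop n) := by unfold Pre_somefunctLoop; infer_instance
def pvWitness_somefunctLoop : Int := (5)

def Spec_somefunctLoop (n : Int) (out : List Int) : Prop := out = somefunctLoop_alt n
instance (n : Int) (out : List Int) : Decidable (Spec_somefunctLoop n out) := by unfold Spec_somefunctLoop; infer_instance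

-- ===== CLAIM (what is proved, stated in full; the proofs are below) =====
def Claim_equal_somefunctLoop : Prop :=
  ∀ (n : Int), Dom_somefunctLoop n → Pre_somefunctLoop n → Spec_somefunctLoop n (somefunctLoop n)

-- ===== LEMMAS AND PROOFS =====

lemma somefunct_eq (n : Int) : somefunctA n = somefunctB n := by
  simp [somefunctA, somefunctB, increasingOrderA, decreasingOrderA,
        PySem.List.slice?_none_none_neg_one]

lemma findCycle_from (lst : List Int) (a : Int) (k : Nat)
    (hidx : PySem.List.index? lst a = some k)
    (hlast : PySem.List.pyGetD lst (-1) 0 = a) :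
    ∀ i, i ≤ k → findCycleA lst i = PySem.List.slice lst (some (k : Int)) (some (-1)) := by
  obtain ⟨hk, hgk, hbefore⟩ := PySem.List.getElem_of_index?_eq_some hidx
  intro i hi
  induction h : k - i generalizing i with
  | zero =>
    have hik : i = k := by omega
    subst hik
    rw [findCycleA, if_pos hk, hlast, PySem.List.pyGetD_ofNat lst i 0 hk, hgk, if_pos rfl]
  | succ m ih =>
    have hik : i < k := by omega
    have hilen : i < lst.length := by omega
    have hne : lst[i] ≠ a := hbefore i hik
    rw [findCycleA, if_pos hilen, hlast, PySem.List.pyGetD_ofNat lst i 0 hilen, if_neg hne]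
    exact ih (i+1) (by omega) (by omega)

lemma sliceA_eq (seq : List Int) (a : Int) (k : Nat) (hk : k ≤ seq.length) :
    PySem.List.slice (seq ++ [a]) (some (k : Int)) (some (-1)) = seq.drop k := by
  have h1 : PySem.List.slice (seq ++ [a]) (some (k : Int)) (some (-1))
      = ((seq ++ [a]).drop (PySem.List.clampIdx (seq ++ [a]).length (k : Int))).take
          (PySem.List.clampIdx (seq ++ [a]).length (-1)
            - PySem.List.clampIdx (seq ++ [a]).length (k : Int)) := rfl
  rw [h1]
  simp only [PySem.List.clampIdx_neg_one, PySem.List.clampIdx_natCast, List.length_append,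
    List.length_cons, List.length_nil]
  have hmin : min k (seq.length + 1) = k := by omega
  rw [hmin]
  rw [List.drop_append_of_le_length hk]
  have hlen : (seq.drop k).length = seq.length - k := by simp
  have : seq.length + 1 - 1 - k = (seq.drop k).length := by omega
  rw [this, List.take_left]

-- the terminal shape of side A: scanning lst ++ [a] for a yields the suffix of lst from a's
-- first occurrence (all of it gone if a is fresh)
lemma terminalA_mem (seq : List Int) (a : Int) (k : Nat)
    (hk : PySem.List.index? seq a = some k) :
    findCycleA (seq ++ [a]) 0 = seq.drop k := by
  have hlast : PySem.List.pyGetD (seq ++ [a]) (-1) 0 = a :=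
    PySem.List.pyGetD_neg_one_append_singleton seq a 0
  have hklt : k < seq.length := (PySem.List.getElem_of_index?_eq_some hk).1
  have hidx2 : PySem.List.index? (seq ++ [a]) a = some k := by
    rw [PySem.List.index?_append_of_mem [a] ((PySem.List.index?_isSome_iff seq a).1 (by rw [hk]; rfl)), hk]
  rw [findCycle_from (seq ++ [a]) a k hidx2 hlast 0 (by omega)]
  exact sliceA_eq seq a k (by omega)

lemma terminalA_fresh (seq : List Int) (a : Int) (hmem : a ∉ seq) :
    findCycleA (seq ++ [a]) 0 = [] := by
  have hlast : PySem.List.pyGetD (seq ++ [a]) (-1) 0 = a :=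
    PySem.List.pyGetD_neg_one_append_singleton seq a 0
  have hidx2 : PySem.List.index? (seq ++ [a]) a = some seq.length :=
    PySem.List.index?_append_singleton_self seq a hmem
  rw [findCycle_from (seq ++ [a]) a seq.length hidx2 hlast 0 (by omega)]
  rw [sliceA_eq seq a seq.length (by omega)]
  simp

-- seen plays the role of the set of elements of lst
def SeenInv (lst : List Int) (seen : PySem.Set Int) : Prop :=
  ∀ x, PySem.Set.contains seen x = true ↔ x ∈ lst

lemma seenInv_step (lst : List Int) (seen : PySem.Set Int) (a : Int)
    (hinv : SeenInv lst seen) : SeenInv (lst ++ [a]) (PySem.Set.union seen [a]) := by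
  intro x
  have hu : PySem.Set.union seen [a] = PySem.Set.add seen a := by
    simp [PySem.Set.union, PySem.Set.update]
  rw [hu]
  constructor
  · intro h
    have : x ∈ PySem.Set.add seen a := by simpa [PySem.Set.contains] using h
    rcases (PySem.Set.mem_add seen a x).1 this with h1 | h1
    · exact List.mem_append.2 (Or.inl ((hinv x).1 (by simpa [PySem.Set.contains] using h1)))
    · subst h1; simp
  · intro h
    rcases List.mem_append.1 h with h1 | h1
    · have : x ∈ (seen : List Int) := by
        have hxx := (hinv x).2 h1
        simp [PySem.Set.contains] at hxx
        exact hxx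
      simpa [PySem.Set.contains] using (PySem.Set.mem_add seen a x).2 (Or.inl this)
    · have hx : x = a := by simp at h1; exact h1
      subst hx
      simp [PySem.Set.contains]

-- the main invariant: walkB's result determines side A's result
lemma walk_eq : ∀ (fuel : Nat) (a : Int) (lst : List Int) (seen : PySem.Set Int),
    SeenInv lst seen →
    (((walkB fuel a seen).2.2 = true →
        findCycleA (stopping1A fuel a lst) 0 = (walkB fuel a seen).2.1) ∧
     ((walkB fuel a seen).2.2 = false →
        ∃ k, PySem.List.index? lst (walkB fuel a seen).1 = some k ∧
          findCycleA (stopping1A fuel a lst) 0 = lst.drop k ++ (walkB fuel a seen).2.1)) := by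
  intro fuel
  induction fuel with
  | zero =>
    intro a lst seen hinv
    by_cases hmem : a ∈ lst
    · have hc : PySem.Set.contains seen a = true := (hinv a).2 hmem
      obtain ⟨k, hk⟩ : ∃ k, PySem.List.index? lst a = some k :=
        Option.isSome_iff_exists.mp ((PySem.List.index?_isSome_iff lst a).2 hmem)
      refine ⟨?_, ?_⟩ <;> rw [walkB, if_pos hc]
      · intro h; simp at h
      · intro _
        exact ⟨k, hk, by rw [stopping1A, terminalA_mem lst a k hk]; simp⟩
    · have hc : ¬ PySem.Set.contains seen a = true := fun h => hmem ((hinv a).1 h)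
      refine ⟨?_, ?_⟩ <;> rw [walkB, if_neg hc]
      · intro _
        rw [stopping1A, terminalA_fresh lst a hmem]
      · intro h; simp at h
  | succ f ih =>
    intro a lst seen hinv
    by_cases hmem : a ∈ lst
    · have hc : PySem.Set.contains seen a = true := (hinv a).2 hmem
      obtain ⟨k, hk⟩ : ∃ k, PySem.List.index? lst a = some k :=
        Option.isSome_iff_exists.mp ((PySem.List.index?_isSome_iff lst a).2 hmem)
      refine ⟨?_, ?_⟩ <;> rw [walkB, if_pos hc]
      · intro h; simp at h
      · intro _
        exact ⟨k, hk, by rw [stopping1A, if_pos hmem, terminalA_mem lst a k hk]; simp⟩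
    · have hc : ¬ PySem.Set.contains seen a = true := fun h => hmem ((hinv a).1 h)
      have hinv' : SeenInv (lst ++ [a]) (PySem.Set.union seen [a]) := seenInv_step lst seen a hinv
      obtain ⟨ihT, ihF⟩ := ih (somefunctB a) (lst ++ [a]) (PySem.Set.union seen [a]) hinv'
      have hA : stopping1A (f+1) a lst = stopping1A f (somefunctA a) (lst ++ [a]) := by
        rw [stopping1A, if_neg hmem]
      have hB : walkB (f+1) a seen =
          (match walkB f (somefunctB a) (PySem.Set.union seen [a]) with
           | (r, cyc, done) => if done then (r, cyc, true) else (r, a :: cyc, decide (a = r))) := by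
        rw [walkB, if_neg hc]
      rcases hw : walkB f (somefunctB a) (PySem.Set.union seen [a]) with ⟨r, cyc, done⟩
      rw [hw] at ihT ihF
      cases done with
      | true =>
        have hres : walkB (f+1) a seen = (r, cyc, true) := by rw [hB, hw]; simp
        refine ⟨?_, ?_⟩ <;> rw [hres]
        · intro _
          rw [hA, somefunct_eq, ihT rfl]
        · intro h; simp at h
      | false =>
        obtain ⟨k, hk, hval⟩ := ihF rfl
        have hres : walkB (f+1) a seen = (r, a :: cyc, decide (a = r)) := by rw [hB, hw]; simp
        by_cases har : a = r
        · subst har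
          have hkr : k = lst.length := by
            have := PySem.List.index?_append_singleton_self lst a hmem
            rw [this] at hk
            exact (Option.some_inj.1 hk).symm
          refine ⟨?_, ?_⟩ <;> rw [hres]
          · intro _
            rw [hA, somefunct_eq, hval, hkr]
            simp
          · intro h; simp at h
        · have hrl : r ∈ lst := by
            have hr2 : r ∈ lst ++ [a] := (PySem.List.index?_isSome_iff (lst ++ [a]) r).1 (by rw [hk]; rfl)
            rcases List.mem_append.1 hr2 with h1 | h1
            · exact h1
            · have hra : r = a := by simpa using h1
              exact absurd hra.symm har
          have hk' : PySem.List.index? lst r = some k := by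
            rw [PySem.List.index?_append_of_mem [a] hrl] at hk
            exact hk
          have hklt : k < lst.length := (PySem.List.getElem_of_index?_eq_some hk').1
          refine ⟨?_, ?_⟩ <;> rw [hres]
          · intro h
            exact absurd (of_decide_eq_true (by simpa using h)) har
          · intro _
            refine ⟨k, hk', ?_⟩
            rw [hA, somefunct_eq, hval]
            rw [List.drop_append_of_le_length (by omega)]
            simp
  
-- ===== VERDICT (by name: the statement is the Claim_ definition above) =====
theorem somefunctLoop_spec : Claim_equal_somefunctLoop := by
  intro n _ _
  unfold Spec_somefunctLoop somefunctLoop somefunctLoop_alt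
  have hinv : SeenInv [] PySem.Set.empty := by
    intro x; simp [PySem.Set.contains, PySem.Set.empty]
  obtain ⟨hT, hF⟩ := walk_eq pvFuel n [] PySem.Set.empty hinv
  cases hdone : (walkB pvFuel n PySem.Set.empty).2.2 with
  | true => exact hT hdone
  | false =>
    obtain ⟨k, hk, _⟩ := hF hdone
    simp [PySem.List.index?] at hk
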